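-- pv_equiv track=rewrite | github.com/alexandr-lavrov/yandex-tank | yandextank/plugins/Influx/decoder.py | convert_hist
-- ===== SOURCE A (Python) =====
-- def convert_hist(hist, sep=None):
--     points = sep or (0, 1, 10, 100, 1000, 10000)
--
--     data = hist['data']
--     bins = hist['bins']
--     return [
--         {
--             'from': left,
--             'to': right,
--             'count': sum(
--                 d for b, d in zip(bins, data)
--                 if left <= b / 1000 < right
--             )
--         } for left, right in zip(points[:-1], points[1:])
--     ]
-- ===== SOURCE B (Python) =====
-- def convert_hist(hist, sep=None):
--     points = list(sep or (0, 1, 10, 100, 1000, 10000))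
--     data = hist['data']
--     bins = hist['bins']
--     n = len(points) - 1 if points else 0
--     counts = [0] * n
--     # single pass over the bins: scale once to integer arithmetic
--     # (left <= b/1000 < right  <=>  1000*left <= b < 1000*right for integer bounds)
--     for b, d in zip(bins, data):
--         for i in range(n):
--             if points[i] * 1000 <= b < points[i + 1] * 1000:
--                 counts[i] += d
--     return [{'from': points[i], 'to': points[i + 1], 'count': counts[i]}
--             for i in range(n)]
-- ===== Notes on version B (the rewrite author's own statement) =====
-- stated objective: alternative
-- what changed: Instead of re-scanning all bins once per bucket with a float division per test, B makes one pass over the bins accumulating a counts array (testing each bin against the bucket bounds scaled once to exact integer arithmetic) and then emits the bucket dicts from that array.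
import Mathlib
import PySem

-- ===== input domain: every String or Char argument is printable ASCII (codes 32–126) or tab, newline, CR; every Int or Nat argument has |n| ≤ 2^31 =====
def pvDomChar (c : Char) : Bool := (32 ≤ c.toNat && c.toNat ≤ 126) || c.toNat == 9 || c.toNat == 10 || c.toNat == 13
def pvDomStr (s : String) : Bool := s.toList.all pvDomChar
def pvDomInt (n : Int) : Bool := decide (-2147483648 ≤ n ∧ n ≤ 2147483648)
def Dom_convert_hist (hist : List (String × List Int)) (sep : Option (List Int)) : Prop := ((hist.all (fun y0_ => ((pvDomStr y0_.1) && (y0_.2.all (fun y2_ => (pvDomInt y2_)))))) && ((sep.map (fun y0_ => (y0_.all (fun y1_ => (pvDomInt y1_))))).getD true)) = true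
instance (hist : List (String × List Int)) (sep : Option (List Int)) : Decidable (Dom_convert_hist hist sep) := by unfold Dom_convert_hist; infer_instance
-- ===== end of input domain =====

-- B replaces A's per-bucket rescans of all bins by one pass over the bins that accumulates a
-- counts array (bucket bounds scaled once to exact integer arithmetic); objective: alternative.

-- ===== PORT A =====
-- `hist[k]` on the dict (assoc list, unique keys): first match
def pvLookupA (hist : List (String × List Int)) (k : String) : Option (List Int) :=
  (hist.find? (fun p => p.1 == k)).map (·.2)

-- `sep or (0, 1, 10, 100, 1000, 10000)`: Python `or` takes the default when sep is None or []
def pvPointsA (sep : Option (List Int)) : List Int :=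
  match sep with
  | some l => if l.isEmpty then [0, 1, 10, 100, 1000, 10000] else l
  | none => [0, 1, 10, 100, 1000, 10000]

-- `left <= b / 1000 < right` is Python float comparison; for integer bounds and |b| ≤ 2^31 the
-- rounding error of b/1000 (< 2^-30) cannot cross an integer, so it is exactly
-- 1000*left ≤ b ∧ b < 1000*right on Dom (ported as that integer comparison, exact there).
def convert_hist (hist : List (String × List Int)) (sep : Option (List Int)) : List (List (String × Int)) :=
  let points := pvPointsA sep
  match pvLookupA hist "data", pvLookupA hist "bins" with
  | some data, some bins =>
      (List.zip points.dropLast points.tail).map (fun lr =>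
        [("from", lr.1), ("to", lr.2),
         ("count", (List.zip bins data).foldl
            (fun acc bd => if 1000 * lr.1 ≤ bd.1 ∧ bd.1 < 1000 * lr.2 then acc + bd.2 else acc) 0)])
  | _, _ => []  -- unreachable under Pre_ (KeyError in Python)

-- ===== PORT B =====
-- `hist[k]` on the dict (assoc list, unique keys): first match
def pvLookupB (hist : List (String × List Int)) (k : String) : Option (List Int) :=
  (hist.find? (fun p => p.1 == k)).map (·.2)

-- `sep or (0, 1, 10, 100, 1000, 10000)`: Python `or` takes the default when sep is None or []
def pvPointsB (sep : Option (List Int)) : List Int :=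
  let l := sep.getD []
  if l.isEmpty then [0, 1, 10, 100, 1000, 10000] else l

-- body of Source B's inner loop: add d to counts[i] when bucket i's (scaled) range contains b
def pvStep (points : List Int) (b d : Int) (cs : List Int) (i : Nat) : List Int :=
  if points.getD i 0 * 1000 ≤ b ∧ b < points.getD (i + 1) 0 * 1000
  then cs.set i (cs.getD i 0 + d) else cs

-- inner loop of Source B: `for i in range(n): ...`
def pvBucketAdd (points : List Int) (n : Nat) (cs : List Int) (b d : Int) : List Int :=
  (List.range n).foldl (pvStep points b d) cs

def convert_hist_alt (hist : List (String × List Int)) (sep : Option (List Int)) : List (List (String × Int)) :=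
  let points := pvPointsB sep
  match pvLookupB hist "data" with
  | none => []
  | some data =>
      match pvLookupB hist "bins" with
      | none => []
      | some bins =>
          let n := points.length - 1
          let counts := (List.zip bins data).foldl
            (fun cs bd => pvBucketAdd points n cs bd.1 bd.2) (List.replicate n 0)
          (List.range n).map (fun i =>
            [("from", points.getD i 0), ("to", points.getD (i + 1) 0), ("count", counts.getD i 0)])

-- ===== PRECONDITION & SPEC =====
-- Pre_ excludes exactly the inputs where Python A raises KeyError: hist missing 'data' or 'bins'.
def Pre_convert_hist (hist : List (String × List Int)) (sep : Option (List Int)) : Prop :=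
  (hist.find? (fun p => p.1 == "data")).isSome = true ∧ (hist.find? (fun p => p.1 == "bins")).isSome = true
instance (hist : List (String × List Int)) (sep : Option (List Int)) : Decidable (Pre_convert_hist hist sep) := by unfold Pre_convert_hist; infer_instance

def pvWitness_convert_hist : (List (String × List Int)) × Option (List Int) :=
  ([("data", [3, 4]), ("bins", [500, 1500])], none)

def Spec_convert_hist (hist : List (String × List Int)) (sep : Option (List Int)) (out : List (List (String × Int))) : Prop := out = convert_hist_alt hist sep
instance (hist : List (String × List Int)) (sep : Option (List Int)) (out : List (List (String × Int))) : Decidable (Spec_convert_hist hist sep out) := by unfold Spec_convert_hist; infer_instance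

-- ===== CLAIM (what is proved, stated in full; the proofs are below) =====
def Claim_equal_convert_hist : Prop := ∀ (hist : List (String × List Int)) (sep : Option (List Int)), Dom_convert_hist hist sep → Pre_convert_hist hist sep → Spec_convert_hist hist sep (convert_hist hist sep)

-- ===== LEMMAS AND PROOFS =====

-- per-bin contribution to bucket j
def pvContrib (points : List Int) (j : Nat) (l : List (Int × Int)) : Int :=
  (l.map (fun bd => if points.getD j 0 * 1000 ≤ bd.1 ∧ bd.1 < points.getD (j + 1) 0 * 1000 then bd.2 else 0)).sum

theorem pv_getD_set_ne (l : List Int) {i j : Nat} (v : Int) (h : i ≠ j) :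
    (l.set i v).getD j 0 = l.getD j 0 := by
  simp [List.getD, h]

theorem pvStep_pos (points : List Int) (b d : Int) (cs : List Int) (i : Nat)
    (hc : points.getD i 0 * 1000 ≤ b ∧ b < points.getD (i + 1) 0 * 1000) :
    pvStep points b d cs i = cs.set i (cs.getD i 0 + d) := by
  unfold pvStep; rw [if_pos hc]

theorem pvStep_neg (points : List Int) (b d : Int) (cs : List Int) (i : Nat)
    (hc : ¬ (points.getD i 0 * 1000 ≤ b ∧ b < points.getD (i + 1) 0 * 1000)) :
    pvStep points b d cs i = cs := by
  unfold pvStep; rw [if_neg hc]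

theorem pv_getD_set_self (l : List Int) {i : Nat} (v : Int) (h : i < l.length) :
    (l.set i v).getD i 0 = v := by
  simp [List.getD, h]

theorem pvStep_length (points : List Int) (b d : Int) (cs : List Int) (i : Nat) :
    (pvStep points b d cs i).length = cs.length := by
  unfold pvStep; split_ifs <;> simp

theorem pvFold_length (points : List Int) (b d : Int) (l : List Nat) (cs : List Int) :
    (l.foldl (pvStep points b d) cs).length = cs.length := by
  induction l generalizing cs with
  | nil => rfl
  | cons i t ih => rw [List.foldl_cons, ih, pvStep_length]

theorem pvBucketAdd_length (points : List Int) (n : Nat) (cs : List Int) (b d : Int) :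
    (pvBucketAdd points n cs b d).length = cs.length := pvFold_length points b d _ cs

theorem pvFold_untouched (points : List Int) (b d : Int) (j : Nat) (l : List Nat)
    (hl : ∀ i ∈ l, i ≠ j) : ∀ cs : List Int,
    (l.foldl (pvStep points b d) cs).getD j 0 = cs.getD j 0 := by
  induction l with
  | nil => intro cs; rfl
  | cons i t ih =>
      intro cs
      rw [List.foldl_cons, ih (fun i hi => hl i (List.mem_cons_of_mem _ hi))]
      by_cases hc : points.getD i 0 * 1000 ≤ b ∧ b < points.getD (i + 1) 0 * 1000
      · rw [pvStep_pos points b d _ i hc]; exact pv_getD_set_ne cs _ (hl i (by simp))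
      · rw [pvStep_neg points b d _ i hc]

theorem pvBucketAdd_getD (points : List Int) (n : Nat) (cs : List Int) (b d : Int)
    (j : Nat) (hj : j < n) (hjc : j < cs.length) :
    (pvBucketAdd points n cs b d).getD j 0 =
      cs.getD j 0 + (if points.getD j 0 * 1000 ≤ b ∧ b < points.getD (j + 1) 0 * 1000 then d else 0) := by
  unfold pvBucketAdd
  induction n generalizing cs with
  | zero => omega
  | succ m ih =>
      rw [List.range_succ, List.foldl_append, List.foldl_cons, List.foldl_nil]
      rcases Nat.lt_or_ge j m with hjm | hjm
      · have hih := ih cs hjm hjc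
        by_cases hc : points.getD m 0 * 1000 ≤ b ∧ b < points.getD (m + 1) 0 * 1000
        · rw [pvStep_pos points b d _ m hc, pv_getD_set_ne _ _ (by omega)]; exact hih
        · rw [pvStep_neg points b d _ m hc]; exact hih
      · have hj' : j = m := by omega
        subst hj'
        have h0 := pvFold_untouched points b d j (List.range j)
          (by intro i hi; simp at hi; omega) cs
        have hlen := pvFold_length points b d (List.range j) cs
        by_cases hc : points.getD j 0 * 1000 ≤ b ∧ b < points.getD (j + 1) 0 * 1000
        · rw [pvStep_pos points b d _ j hc, pv_getD_set_self _ _ (by omega), h0, if_pos hc]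
        · rw [pvStep_neg points b d _ j hc, h0, if_neg hc]; ring

-- counts after the one-pass fold: bucket j holds the total contribution of the bins seen
theorem pvCounts_getD (points : List Int) (n : Nat) (l : List (Int × Int)) (cs : List Int)
    (hlen : cs.length = n) (j : Nat) (hj : j < n) :
    ((l.foldl (fun cs bd => pvBucketAdd points n cs bd.1 bd.2) cs).getD j 0) =
      cs.getD j 0 + pvContrib points j l := by
  induction l generalizing cs with
  | nil => simp [pvContrib]
  | cons bd t ih =>
      simp only [List.foldl_cons]
      rw [ih _ (by rw [pvBucketAdd_length]; exact hlen)]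
      rw [pvBucketAdd_getD points n cs bd.1 bd.2 j hj (by omega)]
      simp [pvContrib]
      ring

-- A's guarded-accumulator sum is the same contribution
theorem pvSumA (points : List Int) (j : Nat) (l : List (Int × Int)) (acc : Int) :
    l.foldl (fun acc bd =>
        if 1000 * points.getD j 0 ≤ bd.1 ∧ bd.1 < 1000 * points.getD (j + 1) 0
        then acc + bd.2 else acc) acc = acc + pvContrib points j l := by
  induction l generalizing acc with
  | nil => simp [pvContrib]
  | cons bd t ih =>
      simp only [List.foldl_cons]
      rw [ih]
      simp only [pvContrib, List.map_cons, List.sum_cons]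
      have heq : (1000 * points.getD j 0 ≤ bd.1 ∧ bd.1 < 1000 * points.getD (j + 1) 0) ↔
             (points.getD j 0 * 1000 ≤ bd.1 ∧ bd.1 < points.getD (j + 1) 0 * 1000) := by
        constructor <;> intro h <;> exact ⟨by linarith [h.1], by linarith [h.2]⟩
      split_ifs with h1 h2 h2
      · ring
      · exact absurd (heq.mp h1) h2
      · exact absurd (heq.mpr h2) h1
      · ring

-- the zip of adjacent points, as a map over indices
theorem pvZipAdj (points : List Int) :
    List.zip points.dropLast points.tail =
      (List.range (points.length - 1)).map (fun j => (points.getD j 0, points.getD (j + 1) 0)) := by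
  apply List.ext_getElem
  · simp [List.length_zip]
  · intro j h1 h2
    have hj : j < points.length - 1 := by simpa using h2
    have hj1 : j < points.length := by omega
    have hj2 : j + 1 < points.length := by omega
    simp [List.getElem_zip, List.getElem_dropLast, List.getElem_tail, List.getD,
      List.getElem?_eq_getElem hj1, List.getElem?_eq_getElem hj2]

-- ===== VERDICT (by name: the statement is the Claim_ definition above) =====
theorem convert_hist_spec : Claim_equal_convert_hist := by
  intro hist sep _ hpre
  obtain ⟨hd, hb⟩ := hpre
  unfold Spec_convert_hist convert_hist convert_hist_alt
  obtain ⟨pd, hdata⟩ := Option.isSome_iff_exists.mp hd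
  obtain ⟨pb, hbins⟩ := Option.isSome_iff_exists.mp hb
  have hLBA : pvLookupB = pvLookupA := rfl
  have hPBA : pvPointsB = pvPointsA := by
    funext sep; unfold pvPointsB pvPointsA
    cases sep with
    | none => rfl
    | some l => cases l <;> rfl
  have hdA : pvLookupA hist "data" = some pd.2 := by unfold pvLookupA; rw [hdata]; rfl
  have hbA : pvLookupA hist "bins" = some pb.2 := by unfold pvLookupA; rw [hbins]; rfl
  rw [hLBA, hPBA, hdA, hbA]
  simp only
  set points := pvPointsA sep with hp
  set n := points.length - 1 with hn
  rw [pvZipAdj, List.map_map]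
  apply List.map_congr_left
  intro j hj
  have hjn : j < n := by simpa using hj
  simp only [Function.comp]
  congr 2
  rw [pvSumA, pvCounts_getD points n _ _ (by simp) j hjn]
  simp
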